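-- pv_equiv track=rewrite | github.com/M1778M/OMEGAPy | OMEGAPy-Project/omg/xlang/xbase.py | safe_clean_sp
-- ===== SOURCE A (Python) =====
-- def safe_clean_sp(line):
--     out = ''
--     x=0
--     for i in line:
--         if i!=' ' or i!='\t' and x==1:
--             x = 1
--             out+=i
--         elif i==' ' or i=='\t' and x==1:
--             continue
--     return out
-- ===== SOURCE B (Python) =====
-- def safe_clean_sp(line):
--     return line.lstrip(' ')
-- ===== Notes on version B (the rewrite author's own statement) =====
-- stated objective: simpler
-- what changed: Replaced the flag-driven character-by-character rebuild with a single lstrip restricted to the space character, since the loop's condition reduces to removing only the leading run of spaces.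
import Mathlib
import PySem

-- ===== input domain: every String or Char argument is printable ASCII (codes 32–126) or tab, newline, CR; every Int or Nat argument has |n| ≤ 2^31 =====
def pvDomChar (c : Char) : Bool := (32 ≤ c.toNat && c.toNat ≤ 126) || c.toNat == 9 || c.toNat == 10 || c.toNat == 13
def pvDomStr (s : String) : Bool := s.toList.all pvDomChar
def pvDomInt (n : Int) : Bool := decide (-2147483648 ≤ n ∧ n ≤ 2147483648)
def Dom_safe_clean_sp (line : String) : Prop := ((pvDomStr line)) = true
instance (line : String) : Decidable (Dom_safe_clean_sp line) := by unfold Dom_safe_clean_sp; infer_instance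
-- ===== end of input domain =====

-- B replaces A's flag-driven loop-and-append with stripping the leading run of spaces directly (simpler).

-- ===== PORT A =====
-- literal port of A's loop: state (out, x), same branch order; 'out += i' is out ++ [i]
def pvLoopA : List Char → List Char → Bool → List Char
  | [], out, _ => out
  | i :: rest, out, x =>
      if i ≠ ' ' || (i ≠ '\t' && x) then pvLoopA rest (out ++ [i]) true
      else if i = ' ' || (i = '\t' && x) then pvLoopA rest out x
      else pvLoopA rest out x

def safe_clean_sp (line : String) : String :=
  String.ofList (pvLoopA line.toList [] false)

-- ===== PORT B =====
-- port of Source B's line.lstrip(' '): drop the leading spaces, return the suffix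
def safe_clean_sp_alt (line : String) : String :=
  String.ofList (line.toList.dropWhile (· == ' '))

-- ===== PRECONDITION & SPEC =====
def Spec_safe_clean_sp (line : String) (out : String) : Prop := out = safe_clean_sp_alt line
instance (line : String) (out : String) : Decidable (Spec_safe_clean_sp line out) := by unfold Spec_safe_clean_sp; infer_instance

-- ===== CLAIM (what is proved, stated in full; the proofs are below) =====
def Claim_equal_safe_clean_sp : Prop := ∀ (line : String), Dom_safe_clean_sp line → Spec_safe_clean_sp line (safe_clean_sp line)

-- ===== LEMMAS AND PROOFS =====

-- once the flag is set, A's condition is always true: everything is appended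
theorem pvLoopA_true (l out : List Char) : pvLoopA l out true = out ++ l := by
  induction l generalizing out with
  | nil => simp [pvLoopA]
  | cons i rest ih =>
      by_cases h : i = ' '
      · subst h; simp [pvLoopA, ih]
      · simp [pvLoopA, h, ih]

-- with the flag unset, A skips exactly the leading spaces
theorem pvLoopA_false (l out : List Char) :
    pvLoopA l out false = out ++ l.dropWhile (· == ' ') := by
  induction l generalizing out with
  | nil => simp [pvLoopA]
  | cons i rest ih =>
      by_cases h : i = ' '
      · subst h; simp [pvLoopA, List.dropWhile, ih]
      · have hb : (i == ' ') = false := beq_false_of_ne h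
        have hd : (i :: rest).dropWhile (· == ' ') = i :: rest := by
          simp [List.dropWhile, hb]
        simp [pvLoopA, h, pvLoopA_true, hd]

-- ===== VERDICT (by name: the statement is the Claim_ definition above) =====
theorem safe_clean_sp_spec : Claim_equal_safe_clean_sp := by
  intro line _
  unfold Spec_safe_clean_sp safe_clean_sp safe_clean_sp_alt
  rw [pvLoopA_false]
  simp
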